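-- pv_equiv track=rewrite | github.com/k85-ai/KB1 | confidence_refine.py | filter_candidate_traces
-- ===== SOURCE A (Python) =====
-- from typing import List, Optional, Tuple, Set, Dict
--
-- Seq = List[str]
--
-- def filter_candidate_traces(
--     pos_new: List[Seq],
--     neg_new: List[Seq],
--     existing_pos: List[Seq],
--     existing_neg: List[Seq],
-- ) -> Tuple[List[Seq], List[Seq]]:
--     """
--     Remove duplicates against existing train data and remove pos/neg conflicts.
--     """
--     existing_pos_set = {tuple(x) for x in existing_pos}
--     existing_neg_set = {tuple(x) for x in existing_neg}
--
--     pos_new = [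
--         x for x in pos_new
--         if tuple(x) not in existing_pos_set and tuple(x) not in existing_neg_set
--     ]
--     neg_new = [
--         x for x in neg_new
--         if tuple(x) not in existing_neg_set and tuple(x) not in existing_pos_set
--     ]
--
--     pos_new_set = {tuple(x) for x in pos_new}
--     neg_new_set = {tuple(x) for x in neg_new}
--     conflict_set = pos_new_set & neg_new_set
--
--     if conflict_set:
--         pos_new = [x for x in pos_new if tuple(x) not in conflict_set]
--         neg_new = [x for x in neg_new if tuple(x) not in conflict_set]
--
--     pos_new = [list(x) for x in sorted({tuple(x) for x in pos_new})]
--     neg_new = [list(x) for x in sorted({tuple(x) for x in neg_new})]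
--
--     return pos_new, neg_new
-- ===== SOURCE B (Python) =====
-- def filter_candidate_traces(pos_new, neg_new, existing_pos, existing_neg):
--     # One-pass tagging: record for every trace which kinds of source it occurs
--     # in, then one sorted sweep keeps traces tagged only "pos" (resp. only "neg").
--     sources = {}
--     for tag, group in (("pos", pos_new), ("neg", neg_new),
--                        ("old", existing_pos), ("old", existing_neg)):
--         for x in group:
--             t = tuple(x)
--             sources[t] = sources.get(t, set()) | {tag}
--     pos, neg = [], []
--     for t in sorted(sources):
--         tags = sources.get(t, set())
--         if tags == {"pos"}:
--             pos.append(list(t))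
--         elif tags == {"neg"}:
--             neg.append(list(t))
--     return pos, neg
-- ===== Notes on version B (the rewrite author's own statement) =====
-- stated objective: alternative
-- what changed: Replaces A's staged set-exclusion filter passes and conditional conflict removal with a single tagging pass that builds one dict mapping each trace to the set of source kinds it occurs in, followed by one sorted sweep classifying each distinct trace by its exact tag set ({'pos'} / {'neg'}).
import Mathlib
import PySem

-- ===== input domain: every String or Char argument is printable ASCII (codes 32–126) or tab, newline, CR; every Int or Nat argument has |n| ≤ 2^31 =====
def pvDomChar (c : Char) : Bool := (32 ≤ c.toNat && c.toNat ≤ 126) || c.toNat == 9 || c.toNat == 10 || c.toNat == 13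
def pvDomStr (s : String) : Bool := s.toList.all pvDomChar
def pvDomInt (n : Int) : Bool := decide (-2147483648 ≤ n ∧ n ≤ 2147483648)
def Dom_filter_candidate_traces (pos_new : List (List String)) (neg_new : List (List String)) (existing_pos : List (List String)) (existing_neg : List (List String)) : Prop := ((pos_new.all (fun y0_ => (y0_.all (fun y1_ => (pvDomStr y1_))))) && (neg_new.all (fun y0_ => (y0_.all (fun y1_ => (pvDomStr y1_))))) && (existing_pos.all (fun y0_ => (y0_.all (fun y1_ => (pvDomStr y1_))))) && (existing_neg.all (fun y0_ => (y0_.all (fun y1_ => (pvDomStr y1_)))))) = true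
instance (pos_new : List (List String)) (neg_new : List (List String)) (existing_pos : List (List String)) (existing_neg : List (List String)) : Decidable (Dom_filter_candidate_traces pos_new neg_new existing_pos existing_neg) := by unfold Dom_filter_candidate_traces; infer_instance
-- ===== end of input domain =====

-- B replaces A's staged set-exclusion passes with one tagging pass (dict: trace -> set of source kinds) plus one sorted classification sweep; objective: alternative.


-- ===== PORT A =====
def filter_candidate_traces (pos_new : List (List String)) (neg_new : List (List String)) (existing_pos : List (List String)) (existing_neg : List (List String)) : List (List String) × List (List String) :=
  let existing_pos_set : PySem.Set (List String) := PySem.Set.ofList existing_pos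
  let existing_neg_set : PySem.Set (List String) := PySem.Set.ofList existing_neg
  let pos_new1 := pos_new.filter (fun x => !(PySem.Set.contains existing_pos_set x) && !(PySem.Set.contains existing_neg_set x))
  let neg_new1 := neg_new.filter (fun x => !(PySem.Set.contains existing_neg_set x) && !(PySem.Set.contains existing_pos_set x))
  let pos_new_set := PySem.Set.ofList pos_new1
  let neg_new_set := PySem.Set.ofList neg_new1
  let conflict_set := PySem.Set.inter pos_new_set neg_new_set
  let pos_new2 := if conflict_set ≠ [] then pos_new1.filter (fun x => !(PySem.Set.contains conflict_set x)) else pos_new1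
  let neg_new2 := if conflict_set ≠ [] then neg_new1.filter (fun x => !(PySem.Set.contains conflict_set x)) else neg_new1
  (PySem.List.sorted (PySem.Set.ofList pos_new2) (fun x => x) false,
   PySem.List.sorted (PySem.Set.ofList neg_new2) (fun x => x) false)

-- ===== PORT B =====
-- transliteration of Source B: one tagging pass building 'sources', then one sweep over sorted(sources)
def filter_candidate_traces_alt (pos_new : List (List String)) (neg_new : List (List String)) (existing_pos : List (List String)) (existing_neg : List (List String)) : List (List String) × List (List String) :=
  let sources : PySem.Dict (List String) (PySem.Set String) :=
    [("pos", pos_new), ("neg", neg_new), ("old", existing_pos), ("old", existing_neg)].foldl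
      (fun m tg => tg.2.foldl (fun m x => m.modify x [] (fun s => PySem.Set.union s [tg.1])) m)
      PySem.Dict.empty
  (PySem.List.sorted sources.keys (fun x => x) false).foldl
    (fun (acc : List (List String) × List (List String)) t =>
      let tags := sources.getD t []
      if PySem.Set.equal tags ["pos"] then (acc.1 ++ [t], acc.2)
      else if PySem.Set.equal tags ["neg"] then (acc.1, acc.2 ++ [t])
      else acc) ([], [])

-- ===== PRECONDITION & SPEC =====
def Spec_filter_candidate_traces (pos_new : List (List String)) (neg_new : List (List String)) (existing_pos : List (List String)) (existing_neg : List (List String)) (out : List (List String) × List (List String)) : Prop := out = filter_candidate_traces_alt pos_new neg_new existing_pos existing_neg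
instance (pos_new : List (List String)) (neg_new : List (List String)) (existing_pos : List (List String)) (existing_neg : List (List String)) (out : List (List String) × List (List String)) : Decidable (Spec_filter_candidate_traces pos_new neg_new existing_pos existing_neg out) := by unfold Spec_filter_candidate_traces; infer_instance

-- ===== CLAIM (what is proved, stated in full; the proofs are below) =====
def Claim_equal_filter_candidate_traces : Prop := ∀ (pos_new : List (List String)) (neg_new : List (List String)) (existing_pos : List (List String)) (existing_neg : List (List String)), Dom_filter_candidate_traces pos_new neg_new existing_pos existing_neg → Spec_filter_candidate_traces pos_new neg_new existing_pos existing_neg (filter_candidate_traces pos_new neg_new existing_pos existing_neg)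

-- ===== LEMMAS AND PROOFS =====

-- the empty-conflict branch of A: no element is in both survivor lists
lemma pv_inter_nil (s t : List (List String))
    (h : PySem.Set.inter (PySem.Set.ofList s) (PySem.Set.ofList t) = []) (x : List String) :
    ¬ (x ∈ s ∧ x ∈ t) := by
  intro hx
  have hxm : x ∈ PySem.Set.inter (PySem.Set.ofList s) (PySem.Set.ofList t) := by
    simp only [PySem.Set.mem_inter, PySem.Set.mem_ofList]
    exact hx
  rw [h] at hxm
  exact (List.not_mem_nil) hxm

-- membership in A's conditionally conflict-filtered first list
lemma pv_mem_core1 (pos1 neg1 : List (List String)) (x : List String) :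
    (x ∈ PySem.Set.ofList (if PySem.Set.inter (PySem.Set.ofList pos1) (PySem.Set.ofList neg1) ≠ [] then
        pos1.filter (fun y => !(PySem.Set.contains (PySem.Set.inter (PySem.Set.ofList pos1) (PySem.Set.ofList neg1)) y))
      else pos1)) ↔ x ∈ pos1 ∧ ¬ (x ∈ pos1 ∧ x ∈ neg1) := by
  split_ifs with h
  · simp [PySem.Set.mem_ofList, List.mem_filter, PySem.Set.mem_inter]
    tauto
  · rw [not_not] at h
    have := pv_inter_nil pos1 neg1 h x
    simp [PySem.Set.mem_ofList]
    tauto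

-- membership in A's conditionally conflict-filtered second list (same conflict set)
lemma pv_mem_core2 (pos1 neg1 : List (List String)) (x : List String) :
    (x ∈ PySem.Set.ofList (if PySem.Set.inter (PySem.Set.ofList pos1) (PySem.Set.ofList neg1) ≠ [] then
        neg1.filter (fun y => !(PySem.Set.contains (PySem.Set.inter (PySem.Set.ofList pos1) (PySem.Set.ofList neg1)) y))
      else neg1)) ↔ x ∈ neg1 ∧ ¬ (x ∈ pos1 ∧ x ∈ neg1) := by
  split_ifs with h
  · simp [PySem.Set.mem_ofList, List.mem_filter, PySem.Set.mem_inter]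
    tauto
  · rw [not_not] at h
    have := pv_inter_nil pos1 neg1 h x
    simp [PySem.Set.mem_ofList]
    tauto

-- s | {tag} is s.add(tag)
lemma pv_union_single (s : PySem.Set String) (tag : String) :
    PySem.Set.union s [tag] = PySem.Set.add s tag := rfl

-- value of the tag dict after one group's tagging loop
lemma pv_getD_tagfold (tag : String) (group : List (List String))
    (m : PySem.Dict (List String) (PySem.Set String)) (t : List String) :
    (group.foldl (fun m x => m.modify x [] (fun s => PySem.Set.union s [tag])) m).getD t []
      = if t ∈ group then PySem.Set.add (m.getD t []) tag else m.getD t [] := by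
  induction group generalizing m with
  | nil => simp
  | cons x rest ih =>
    rw [List.foldl_cons, ih, PySem.Dict.getD_modify, pv_union_single]
    by_cases hx : t = x <;> by_cases hr : t ∈ rest <;>
      simp [hx, hr]

-- the classification sweep is a pair of filters
lemma pv_foldl_classify (l : List (List String)) (p q : List String → Bool)
    (acc : List (List String) × List (List String)) :
    l.foldl (fun acc t => if p t then (acc.1 ++ [t], acc.2)
      else if q t then (acc.1, acc.2 ++ [t]) else acc) acc
      = (acc.1 ++ l.filter p, acc.2 ++ l.filter (fun t => !p t && q t)) := by
  induction l generalizing acc with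
  | nil => simp
  | cons x rest ih =>
    by_cases hp : p x <;> by_cases hq : q x <;>
      simp [hp, hq, ih, List.append_assoc]

-- the keys of the tag dict are set(pos_new + neg_new + existing_pos + existing_neg)
lemma pv_keys_sources (g1 g2 g3 g4 : List (List String)) :
    ([("pos", g1), ("neg", g2), ("old", g3), ("old", g4)].foldl
      (fun m (tg : String × List (List String)) =>
        tg.2.foldl (fun m x => m.modify x [] (fun s => PySem.Set.union s [tg.1])) m)
      PySem.Dict.empty).keys
      = PySem.Set.ofList (g1 ++ g2 ++ g3 ++ g4) := by
  simp only [List.foldl_cons, List.foldl_nil, PySem.Dict.keys_foldl_modify,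
    PySem.Dict.keys_empty]
  rw [PySem.Set.ofList_append, PySem.Set.ofList_append, PySem.Set.ofList_append,
    ← PySem.Set.update_nil_left]

-- value of the final tag dict at t
lemma pv_getD_sources (g1 g2 g3 g4 : List (List String)) (t : List String) :
    ([("pos", g1), ("neg", g2), ("old", g3), ("old", g4)].foldl
      (fun m (tg : String × List (List String)) =>
        tg.2.foldl (fun m x => m.modify x [] (fun s => PySem.Set.union s [tg.1])) m)
      PySem.Dict.empty).getD t []
      = (let s1 := if t ∈ g1 then PySem.Set.add [] "pos" else [];
         let s2 := if t ∈ g2 then PySem.Set.add s1 "neg" else s1;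
         let s3 := if t ∈ g3 then PySem.Set.add s2 "old" else s2;
         if t ∈ g4 then PySem.Set.add s3 "old" else s3) := by
  simp only [List.foldl_cons, List.foldl_nil, pv_getD_tagfold, PySem.Dict.getD_empty]

-- the two DecidableLT instances on List String agree
lemma pv_decLT_eq : (fun (a b : List String) => a.decidableLT b) = (LinearOrder.toDecidableLT : DecidableLT (List String)) := by
  funext a b; exact Subsingleton.elim _ _

-- the tag set equals {"pos"} iff the trace occurs only in the first group (Bool table)
lemma pv_tag_pos_bool (b1 b2 b3 b4 : Bool) :
    PySem.Set.equal
      (let s1 := if b1 = true then PySem.Set.add [] "pos" else ([] : PySem.Set String);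
       let s2 := if b2 = true then PySem.Set.add s1 "neg" else s1;
       let s3 := if b3 = true then PySem.Set.add s2 "old" else s2;
       if b4 = true then PySem.Set.add s3 "old" else s3) ["pos"]
    = (b1 && !b2 && !b3 && !b4) := by revert b1 b2 b3 b4; decide

-- the tag set equals {"neg"} iff the trace occurs only in the second group (Bool table)
lemma pv_tag_neg_bool (b1 b2 b3 b4 : Bool) :
    PySem.Set.equal
      (let s1 := if b1 = true then PySem.Set.add [] "pos" else ([] : PySem.Set String);
       let s2 := if b2 = true then PySem.Set.add s1 "neg" else s1;
       let s3 := if b3 = true then PySem.Set.add s2 "old" else s2;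
       if b4 = true then PySem.Set.add s3 "old" else s3) ["neg"]
    = (!b1 && b2 && !b3 && !b4) := by revert b1 b2 b3 b4; decide

-- Prop-condition forms matching pv_getD_sources
lemma pv_tag_pos (g1 g2 g3 g4 : List (List String)) (t : List String) :
    PySem.Set.equal
      (let s1 := if t ∈ g1 then PySem.Set.add [] "pos" else ([] : PySem.Set String);
       let s2 := if t ∈ g2 then PySem.Set.add s1 "neg" else s1;
       let s3 := if t ∈ g3 then PySem.Set.add s2 "old" else s2;
       if t ∈ g4 then PySem.Set.add s3 "old" else s3) ["pos"]
    = (decide (t ∈ g1) && !decide (t ∈ g2) && !decide (t ∈ g3) && !decide (t ∈ g4)) := by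
  have h := pv_tag_pos_bool (decide (t ∈ g1)) (decide (t ∈ g2)) (decide (t ∈ g3)) (decide (t ∈ g4))
  simp only [decide_eq_true_eq] at h
  exact h

lemma pv_tag_neg (g1 g2 g3 g4 : List (List String)) (t : List String) :
    PySem.Set.equal
      (let s1 := if t ∈ g1 then PySem.Set.add [] "pos" else ([] : PySem.Set String);
       let s2 := if t ∈ g2 then PySem.Set.add s1 "neg" else s1;
       let s3 := if t ∈ g3 then PySem.Set.add s2 "old" else s2;
       if t ∈ g4 then PySem.Set.add s3 "old" else s3) ["neg"]
    = (!decide (t ∈ g1) && decide (t ∈ g2) && !decide (t ∈ g3) && !decide (t ∈ g4)) := by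
  have h := pv_tag_neg_bool (decide (t ∈ g1)) (decide (t ∈ g2)) (decide (t ∈ g3)) (decide (t ∈ g4))
  simp only [decide_eq_true_eq] at h
  exact h

-- sorted(set(xs)) is the unique strictly increasing rearrangement (instance-aligned wrapper over PySem.List.sorted_eq_of_perm_of_pairwise_lt)
lemma pv_sorted_eq (xs ys : List (List String))
    (hperm : ys.Perm (PySem.Set.ofList xs)) (hpw : ys.Pairwise (· < ·)) :
    PySem.List.sorted (PySem.Set.ofList xs) (fun x => x) false = ys := by
  have h := PySem.List.sorted_eq_of_perm_of_pairwise_lt (PySem.Set.ofList xs) ys (fun x => x) hperm hpw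
  rw [← pv_decLT_eq] at h
  exact h

-- ===== VERDICT (by name: the statement is the Claim_ definition above) =====
theorem filter_candidate_traces_spec : Claim_equal_filter_candidate_traces := by
  intro g1 g2 g3 g4 _
  unfold Spec_filter_candidate_traces filter_candidate_traces filter_candidate_traces_alt
  simp only [pv_keys_sources]
  rw [pv_foldl_classify]
  simp only [List.nil_append, Prod.mk.injEq]
  have hS : (PySem.List.sorted (PySem.Set.ofList (g1 ++ g2 ++ g3 ++ g4)) (fun x => x) false).Pairwise (· < ·) := by
    have h := PySem.List.sorted_ofList_pairwise_lt (κ := List String) (g1 ++ g2 ++ g3 ++ g4)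
    rw [← pv_decLT_eq] at h
    exact h
  constructor
  · refine pv_sorted_eq _ _ ?_ (List.Pairwise.sublist (List.filter_sublist) hS)
    refine (List.perm_ext_iff_of_nodup
        (List.Sublist.nodup (List.filter_sublist)
          ((PySem.List.sorted_perm _ _ _).nodup_iff.2 (PySem.Set.nodup_ofList _)))
        (PySem.Set.nodup_ofList _)).2 ?_
    intro a
    rw [List.mem_filter, pv_mem_core1, PySem.List.mem_sorted, PySem.Set.mem_ofList,
      pv_getD_sources, pv_tag_pos]
    simp only [List.mem_filter, List.mem_append, Bool.and_eq_true, Bool.not_eq_true',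
      decide_eq_true_eq, decide_eq_false_iff_not, PySem.Set.contains_eq_listContains,
      List.contains_eq_mem, PySem.Set.mem_ofList]
    tauto
  · refine pv_sorted_eq _ _ ?_ (List.Pairwise.sublist (List.filter_sublist) hS)
    refine (List.perm_ext_iff_of_nodup
        (List.Sublist.nodup (List.filter_sublist)
          ((PySem.List.sorted_perm _ _ _).nodup_iff.2 (PySem.Set.nodup_ofList _)))
        (PySem.Set.nodup_ofList _)).2 ?_
    intro a
    rw [List.mem_filter, pv_mem_core2, PySem.List.mem_sorted, PySem.Set.mem_ofList,
      pv_getD_sources, pv_tag_pos, pv_tag_neg]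
    simp only [List.mem_filter, List.mem_append, Bool.and_eq_true, Bool.not_eq_true',
      decide_eq_true_eq, decide_eq_false_iff_not, Bool.not_and, Bool.or_eq_true,
      PySem.Set.contains_eq_listContains,
      List.contains_eq_mem, PySem.Set.mem_ofList]
    tauto
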